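-- pv_equiv track=rewrite | github.com/zv3zdochka/Ege | 22.py | calculate_max_concurrent_time
-- ===== SOURCE A (Python) =====
-- from itertools import combinations
--
-- def calculate_max_concurrent_time(processes):
--     max_concurrent_time = 0
--
--     for combo in combinations(processes.keys(), 4):
--         current_time = 0
--         dependencies = set()
--
--         for process_id in combo:
--             current_time += processes[process_id][0]
--             dependencies.update(processes[process_id][1])
--
--         # Check if all dependencies are satisfied
--         if all(dep not in combo for dep in dependencies):
--             max_concurrent_time = max(max_concurrent_time, current_time)
--
--     return max_concurrent_time
-- ===== SOURCE B (Python) =====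
-- def calculate_max_concurrent_time(processes):
--     keys = list(processes)
--     # symmetric conflict index over the keys; a self-dependency makes k conflict with itself
--     conflict = {k: set() for k in keys}
--     for k, (t, deps) in processes.items():
--         for d in deps:
--             if d in conflict:
--                 conflict[k].add(d)
--                 conflict[d].add(k)
--
--     def go(rem, chosen, total, best):
--         if len(chosen) == 4:
--             return max(best, total)
--         if not rem:
--             return best
--         k, rest = rem[0], rem[1:]
--         cs = conflict[k]
--         if k not in cs and all(c not in cs for c in chosen):
--             best = go(rest, chosen + [k], total + processes[k][0], best)
--         return go(rest, chosen, total, best)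
--
--     return go(keys, [], 0, 0)
-- ===== Notes on version B (the rewrite author's own statement) =====
-- stated objective: alternative
-- what changed: Replaces A's per-combination union of dependency sets by a precomputed symmetric conflict index plus a pruned recursive backtracking search that abandons a partial selection as soon as one pair conflicts.
import Mathlib
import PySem

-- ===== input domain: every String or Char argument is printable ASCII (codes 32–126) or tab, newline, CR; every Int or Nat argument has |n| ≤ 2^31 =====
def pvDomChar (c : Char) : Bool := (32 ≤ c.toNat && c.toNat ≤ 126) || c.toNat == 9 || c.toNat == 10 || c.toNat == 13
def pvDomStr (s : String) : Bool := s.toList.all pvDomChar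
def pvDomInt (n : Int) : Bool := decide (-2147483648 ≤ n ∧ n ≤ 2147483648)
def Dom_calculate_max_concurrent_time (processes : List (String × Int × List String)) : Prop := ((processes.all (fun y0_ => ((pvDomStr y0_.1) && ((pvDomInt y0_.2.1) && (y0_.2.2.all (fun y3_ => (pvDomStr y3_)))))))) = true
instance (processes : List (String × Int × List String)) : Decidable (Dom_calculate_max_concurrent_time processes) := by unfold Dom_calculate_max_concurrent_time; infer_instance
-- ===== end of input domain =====

-- B replaces A's per-combination union of dependency sets by a precomputed symmetric
-- conflict index plus a pruned recursive search that abandons a partial selection as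
-- soon as one pair conflicts (objective: alternative).

-- ===== PORT A =====
-- processes[k] (both Pythons index the dict by a key drawn from its keys, so the default is never used)
def pvLookup (processes : List (String × Int × List String)) (k : String) : Int × List String :=
  ((processes.find? (fun p => p.1 == k)).getD ("", 0, [])).2

-- itertools.combinations(l, n), in itertools' order
def pyCombinations {α : Type} : Nat → List α → List (List α)
  | 0, _ => [[]]
  | _ + 1, [] => []
  | n + 1, x :: xs => ((pyCombinations n xs).map (fun c => x :: c)) ++ pyCombinations (n + 1) xs

def calculate_max_concurrent_time (processes : List (String × Int × List String)) : Int :=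
  (pyCombinations 4 (processes.map (·.1))).foldl
    (fun max_concurrent_time combo =>
      let current_time := combo.foldl (fun t pid => t + (pvLookup processes pid).1) 0
      let dependencies := combo.foldl
        (fun s pid => PySem.Set.update s (pvLookup processes pid).2) PySem.Set.empty
      if dependencies.all (fun dep => !(combo.contains dep)) then
        max max_concurrent_time current_time
      else max_concurrent_time)
    0

-- ===== PORT B =====
-- the symmetric conflict index: conflict = {k: set() for k in keys}; then for each
-- entry (k, (t, deps)) and each d in deps with d a key: conflict[k].add(d); conflict[d].add(k)
def pvConflict (processes : List (String × Int × List String)) :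
    PySem.Dict String (PySem.Set String) :=
  let conflict0 := (processes.map (·.1)).foldl
    (fun d k => d.insert k PySem.Set.empty) PySem.Dict.empty
  processes.foldl
    (fun d p =>
      p.2.2.foldl
        (fun d dep =>
          if d.contains dep then
            (d.modify p.1 PySem.Set.empty (fun s => PySem.Set.add s dep)).modify dep
              PySem.Set.empty (fun s => PySem.Set.add s p.1)
          else d)
        d)
    conflict0

-- go(rem, chosen, total, best)
def pvGo (processes : List (String × Int × List String))
    (conflict : PySem.Dict String (PySem.Set String)) :
    List String → List String → Int → Int → Int
  | rem, chosen, total, best =>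
    if chosen.length == 4 then max best total
    else
      match rem with
      | [] => best
      | k :: rest =>
        let cs := conflict.getD k PySem.Set.empty
        let best1 :=
          if !(PySem.Set.contains cs k) && chosen.all (fun c => !(PySem.Set.contains cs c)) then
            pvGo processes conflict rest (chosen ++ [k]) (total + (pvLookup processes k).1) best
          else best
        pvGo processes conflict rest chosen total best1

def calculate_max_concurrent_time_alt (processes : List (String × Int × List String)) : Int :=
  pvGo processes (pvConflict processes) (processes.map (·.1)) [] 0 0

-- ===== PRECONDITION & SPEC =====
-- A's argument is a Python dict, whose keys are necessarily distinct; association lists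
-- with duplicate keys represent no dict, so Pre_ excludes them (A never receives one).
def Pre_calculate_max_concurrent_time (processes : List (String × Int × List String)) : Prop :=
  (processes.map (·.1)).Nodup
instance (processes : List (String × Int × List String)) :
    Decidable (Pre_calculate_max_concurrent_time processes) := by
  unfold Pre_calculate_max_concurrent_time; infer_instance

def pvWitness_calculate_max_concurrent_time : (List (String × Int × List String)) :=
  [("a", 3, ["x"]), ("b", 2, []), ("c", 5, ["a"]), ("d", 1, []), ("e", 4, ["e"])]

def Spec_calculate_max_concurrent_time (processes : List (String × Int × List String)) (out : Int) : Prop := out = calculate_max_concurrent_time_alt processes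
instance (processes : List (String × Int × List String)) (out : Int) : Decidable (Spec_calculate_max_concurrent_time processes out) := by unfold Spec_calculate_max_concurrent_time; infer_instance

-- ===== CLAIM (what is proved, stated in full; the proofs are below) =====
def Claim_equal_calculate_max_concurrent_time : Prop := ∀ (processes : List (String × Int × List String)), Dom_calculate_max_concurrent_time processes → Pre_calculate_max_concurrent_time processes → Spec_calculate_max_concurrent_time processes (calculate_max_concurrent_time processes)

-- ===== LEMMAS AND PROOFS =====

-- combo is mutually independent: no member depends on any member
def pvValidB (p : List (String × Int × List String)) (c : List String) : Bool :=
  c.all fun a => c.all fun b => !((pvLookup p a).2.contains b)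

def pvSum (p : List (String × Int × List String)) (c : List String) : Int :=
  c.foldl (fun t pid => t + (pvLookup p pid).1) 0

theorem pvValidB_iff (p : List (String × Int × List String)) (c : List String) :
    pvValidB p c = true ↔ ∀ a ∈ c, ∀ b ∈ c, b ∉ (pvLookup p a).2 := by
  simp [pvValidB]

theorem pvValidB_mono (p : List (String × Int × List String)) {c₁ c₂ : List String}
    (hsub : ∀ x ∈ c₁, x ∈ c₂) (h : pvValidB p c₂ = true) : pvValidB p c₁ = true := by
  rw [pvValidB_iff] at *
  exact fun a ha b hb => h a (hsub a ha) b (hsub b hb)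

theorem mem_depfold (p : List (String × Int × List String)) (c : List String)
    (s : List String) (d : String) :
    d ∈ c.foldl (fun s pid => PySem.Set.update s (pvLookup p pid).2) s ↔
      d ∈ s ∨ ∃ pid ∈ c, d ∈ (pvLookup p pid).2 := by
  induction c generalizing s with
  | nil => simp
  | cons x xs ih =>
    simp only [List.foldl_cons, ih, PySem.Set.mem_update, List.mem_cons]
    constructor
    · rintro ((h | h) | ⟨q, hq, hd⟩)
      · exact Or.inl h
      · exact Or.inr ⟨x, Or.inl rfl, h⟩
      · exact Or.inr ⟨q, Or.inr hq, hd⟩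
    · rintro (h | ⟨q, (rfl | hq), hd⟩)
      · exact Or.inl (Or.inl h)
      · exact Or.inl (Or.inr hd)
      · exact Or.inr ⟨q, hq, hd⟩

theorem A_guard (p : List (String × Int × List String)) (c : List String) :
    ((c.foldl (fun s pid => PySem.Set.update s (pvLookup p pid).2) PySem.Set.empty).all
        fun dep => !(c.contains dep)) = pvValidB p c := by
  rw [Bool.eq_iff_iff, List.all_eq_true, pvValidB_iff]
  constructor
  · intro h a ha b hb hmem
    have := h b (by rw [mem_depfold]; exact Or.inr ⟨a, ha, hmem⟩)
    simp at this
    exact this hb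
  · intro h dep hdep
    rw [mem_depfold] at hdep
    rcases hdep with h' | ⟨q, hq, hd⟩
    · simp [PySem.Set.empty] at h'
    · simp
      intro hc
      exact h q hq dep hc hd

-- A as a fold with the validity test
theorem A_eq_fold (p : List (String × Int × List String)) :
    calculate_max_concurrent_time p =
      (pyCombinations 4 (p.map (·.1))).foldl
        (fun acc c => if pvValidB p c then max acc (pvSum p c) else acc) 0 := by
  unfold calculate_max_concurrent_time
  congr 1
  funext acc c
  simp only [A_guard]
  rfl

theorem lookup_find (p : List (String × Int × List String)) (k : String)
    (hk : k ∈ p.map (·.1)) : ∃ q ∈ p, q.1 = k ∧ pvLookup p k = q.2 := by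
  simp only [List.mem_map] at hk
  obtain ⟨q, hq, hqk⟩ := hk
  have : (p.find? (fun r => r.1 == k)).isSome := by
    rw [List.find?_isSome]
    exact ⟨q, hq, by simp [hqk]⟩
  obtain ⟨r, hr⟩ := Option.isSome_iff_exists.mp this
  refine ⟨r, List.mem_of_find?_eq_some hr, ?_, ?_⟩
  · have := List.find?_some hr
    simpa using this
  · simp [pvLookup, hr]

theorem lookup_eq (p : List (String × Int × List String))
    (hk : (p.map (·.1)).Nodup) {q : String × Int × List String} (hq : q ∈ p) :
    pvLookup p q.1 = q.2 := by
  induction p with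
  | nil => simp at hq
  | cons x xs ih =>
    simp only [List.map_cons, List.nodup_cons] at hk
    rcases List.mem_cons.mp hq with rfl | hq'
    · simp [pvLookup]
    · have hne : ¬(x.1 == q.1) = true := by
        simp only [beq_iff_eq]
        intro h
        exact hk.1 (by rw [h]; exact List.mem_map.mpr ⟨q, hq', rfl⟩)
      simpa [pvLookup, List.find?, hne] using ih hk.2 hq'


theorem step_mem (a b x k : String) (d : PySem.Dict String (PySem.Set String)) :
    x ∈ ((d.modify a PySem.Set.empty (fun s => PySem.Set.add s b)).modify b
        PySem.Set.empty (fun s => PySem.Set.add s a)).getD k PySem.Set.empty ↔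
      x ∈ d.getD k PySem.Set.empty ∨ (k = a ∧ x = b) ∨ (k = b ∧ x = a) := by
  simp only [PySem.Dict.getD_modify]
  split_ifs <;> simp_all

theorem pair_keys (a b x : String) (d : PySem.Dict String (PySem.Set String)) :
    x ∈ ((d.modify a PySem.Set.empty (fun s => PySem.Set.add s b)).modify b
        PySem.Set.empty (fun s => PySem.Set.add s a)).keys ↔ x = b ∨ x = a ∨ x ∈ d.keys := by
  simp [PySem.Dict.keys_modify, PySem.Dict.mem_keys_insert]

theorem inner_keys (pr : String × Int × List String) (ds : List String)
    (d : PySem.Dict String (PySem.Set String)) (hpr : pr.1 ∈ d.keys) (x : String) :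
    x ∈ (ds.foldl
        (fun d dep =>
          if d.contains dep then
            (d.modify pr.1 PySem.Set.empty (fun s => PySem.Set.add s dep)).modify dep
              PySem.Set.empty (fun s => PySem.Set.add s pr.1)
          else d)
        d).keys ↔ x ∈ d.keys := by
  induction ds generalizing d with
  | nil => simp
  | cons dep ds ih =>
    simp only [List.foldl_cons]
    by_cases hc : d.contains dep = true
    · have hdep : dep ∈ d.keys := by
        rw [PySem.Dict.contains_eq_decide_mem_keys] at hc; exact of_decide_eq_true hc
      rw [if_pos hc, ih _ ((pair_keys _ _ _ _).mpr (Or.inr (Or.inl rfl))), pair_keys]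
      constructor
      · rintro (rfl | rfl | h) <;> assumption
      · exact fun h => Or.inr (Or.inr h)
    · rw [if_neg hc]; exact ih d hpr

theorem inner_mem (pr : String × Int × List String) (ds : List String)
    (d : PySem.Dict String (PySem.Set String)) (hpr : pr.1 ∈ d.keys) (k x : String) :
    x ∈ (ds.foldl
        (fun d dep =>
          if d.contains dep then
            (d.modify pr.1 PySem.Set.empty (fun s => PySem.Set.add s dep)).modify dep
              PySem.Set.empty (fun s => PySem.Set.add s pr.1)
          else d)
        d).getD k PySem.Set.empty ↔
      x ∈ d.getD k PySem.Set.empty ∨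
        ∃ dep ∈ ds, dep ∈ d.keys ∧ ((k = pr.1 ∧ x = dep) ∨ (k = dep ∧ x = pr.1)) := by
  induction ds generalizing d with
  | nil => simp
  | cons dep ds ih =>
    simp only [List.foldl_cons, List.mem_cons]
    by_cases hc : d.contains dep = true
    · have hdep : dep ∈ d.keys := by
        rw [PySem.Dict.contains_eq_decide_mem_keys] at hc; exact of_decide_eq_true hc
      have hpr' : pr.1 ∈ ((d.modify pr.1 PySem.Set.empty (fun s => PySem.Set.add s dep)).modify dep
          PySem.Set.empty (fun s => PySem.Set.add s pr.1)).keys :=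
        (pair_keys _ _ _ _).mpr (Or.inr (Or.inl rfl))
      rw [if_pos hc, ih _ hpr', step_mem]
      constructor
      · rintro ((h | h) | ⟨q, hq, hqk, hcase⟩)
        · exact Or.inl h
        · exact Or.inr ⟨dep, Or.inl rfl, hdep, h⟩
        · exact Or.inr ⟨q, Or.inr hq, (pair_keys _ _ _ _).mp hqk |>.elim (fun e => e ▸ hdep) (fun h' => h'.elim (fun e => e ▸ hpr) id), hcase⟩
      · rintro (h | ⟨q, (rfl | hq), hqk, hcase⟩)
        · exact Or.inl (Or.inl h)
        · exact Or.inl (Or.inr hcase)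
        · exact Or.inr ⟨q, hq, (pair_keys _ _ _ _).mpr (Or.inr (Or.inr hqk)), hcase⟩
    · have hdep : dep ∉ d.keys := by
        rw [PySem.Dict.contains_eq_decide_mem_keys] at hc
        exact fun h => hc (decide_eq_true h)
      rw [if_neg hc, ih d hpr]
      constructor
      · rintro (h | ⟨q, hq, hqk, hcase⟩)
        · exact Or.inl h
        · exact Or.inr ⟨q, Or.inr hq, hqk, hcase⟩
      · rintro (h | ⟨q, (rfl | hq), hqk, hcase⟩)
        · exact Or.inl h
        · exact absurd hqk hdep
        · exact Or.inr ⟨q, hq, hqk, hcase⟩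

theorem outer_mem (l : List (String × Int × List String))
    (d : PySem.Dict String (PySem.Set String)) (hkeys : ∀ q ∈ l, q.1 ∈ d.keys) (k x : String) :
    x ∈ (l.foldl
        (fun d p =>
          p.2.2.foldl
            (fun d dep =>
              if d.contains dep then
                (d.modify p.1 PySem.Set.empty (fun s => PySem.Set.add s dep)).modify dep
                  PySem.Set.empty (fun s => PySem.Set.add s p.1)
              else d)
            d)
        d).getD k PySem.Set.empty ↔
      x ∈ d.getD k PySem.Set.empty ∨
        ∃ q ∈ l, ((x ∈ d.keys ∧ q.1 = k ∧ x ∈ q.2.2) ∨ (k ∈ d.keys ∧ x = q.1 ∧ k ∈ q.2.2)) := by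
  induction l generalizing d with
  | nil => simp
  | cons q l ih =>
    have hq1 : q.1 ∈ d.keys := hkeys q (List.mem_cons_self ..)
    simp only [List.foldl_cons, List.mem_cons]
    rw [ih _ (fun r hr => (inner_keys q q.2.2 d hq1 r.1).mpr (hkeys r (List.mem_cons_of_mem _ hr))),
      inner_mem q q.2.2 d hq1]
    constructor
    · rintro ((h | ⟨dep, hdep, hdk, (⟨rfl, rfl⟩ | ⟨rfl, rfl⟩)⟩) | ⟨r, hr, hcase⟩)
      · exact Or.inl h
      · exact Or.inr ⟨q, Or.inl rfl, Or.inl ⟨hdk, rfl, hdep⟩⟩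
      · exact Or.inr ⟨q, Or.inl rfl, Or.inr ⟨hdk, rfl, hdep⟩⟩
      · refine Or.inr ⟨r, Or.inr hr, ?_⟩
        rcases hcase with ⟨hxk, h2⟩ | ⟨hxk, h2⟩
        · exact Or.inl ⟨(inner_keys q q.2.2 d hq1 x).mp hxk, h2⟩
        · exact Or.inr ⟨(inner_keys q q.2.2 d hq1 k).mp hxk, h2⟩
    · rintro (h | ⟨r, (rfl | hr), ⟨hxk, rfl, hd⟩ | ⟨hxk, rfl, hd⟩⟩)
      · exact Or.inl (Or.inl h)
      · exact Or.inl (Or.inr ⟨x, hd, hxk, Or.inl ⟨rfl, rfl⟩⟩)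
      · exact Or.inl (Or.inr ⟨k, hd, hxk, Or.inr ⟨rfl, rfl⟩⟩)
      · exact Or.inr ⟨r, hr, Or.inl ⟨(inner_keys q q.2.2 d hq1 x).mpr hxk, rfl, hd⟩⟩
      · exact Or.inr ⟨r, hr, Or.inr ⟨(inner_keys q q.2.2 d hq1 k).mpr hxk, rfl, hd⟩⟩

theorem conflict0_keys (l : List String) (d : PySem.Dict String (PySem.Set String)) (x : String) :
    x ∈ (l.foldl (fun d k => d.insert k PySem.Set.empty) d).keys ↔ x ∈ d.keys ∨ x ∈ l := by
  induction l generalizing d with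
  | nil => simp
  | cons k l ih =>
    simp only [List.foldl_cons, List.mem_cons, ih, PySem.Dict.mem_keys_insert]
    tauto

theorem conflict0_getD (l : List String) (d : PySem.Dict String (PySem.Set String))
    (h : ∀ k, d.getD k PySem.Set.empty = PySem.Set.empty) (k : String) :
    (l.foldl (fun d k => d.insert k PySem.Set.empty) d).getD k PySem.Set.empty
      = PySem.Set.empty := by
  induction l generalizing d with
  | nil => exact h k
  | cons y l ih =>
    refine ih _ (fun j => ?_)
    rw [PySem.Dict.getD_insert]
    split_ifs
    · rfl
    · exact h j

theorem conflict_mem (p : List (String × Int × List String)) (k x : String) :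
    x ∈ (pvConflict p).getD k PySem.Set.empty ↔
      ∃ q ∈ p, ((x ∈ p.map (·.1) ∧ q.1 = k ∧ x ∈ q.2.2) ∨
                (k ∈ p.map (·.1) ∧ x = q.1 ∧ k ∈ q.2.2)) := by
  unfold pvConflict
  have hc0keys : ∀ y : String,
      y ∈ ((p.map (·.1)).foldl (fun d k => d.insert k PySem.Set.empty)
          (PySem.Dict.empty : PySem.Dict String (PySem.Set String))).keys
        ↔ y ∈ p.map (·.1) := by
    intro y; rw [conflict0_keys]; simp [PySem.Dict.empty]
  rw [outer_mem _ _ (fun q hq => (hc0keys q.1).mpr (List.mem_map.mpr ⟨q, hq, rfl⟩)),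
    conflict0_getD _ _ (fun j => by simp [PySem.Dict.empty, PySem.Dict.getD, PySem.Dict.get?, PySem.Set.empty])]
  simp only [hc0keys]
  simp [PySem.Set.empty]

-- with distinct keys, conflict sets say exactly "one of the two depends on the other"
theorem conflict_mem_nodup (p : List (String × Int × List String))
    (hk : (p.map (·.1)).Nodup) (k x : String)
    (hkK : k ∈ p.map (·.1)) (hxK : x ∈ p.map (·.1)) :
    (x ∈ (pvConflict p).getD k PySem.Set.empty) ↔
      (x ∈ (pvLookup p k).2 ∨ k ∈ (pvLookup p x).2) := by
  rw [conflict_mem]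
  constructor
  · rintro ⟨q, hq, ⟨-, rfl, hd⟩ | ⟨-, rfl, hd⟩⟩
    · exact Or.inl (by rw [lookup_eq p hk hq]; exact hd)
    · exact Or.inr (by rw [lookup_eq p hk hq]; exact hd)
  · rintro (h | h)
    · obtain ⟨q, hq, hq1, hl⟩ := lookup_find p k hkK
      exact ⟨q, hq, Or.inl ⟨hxK, hq1, by rwa [hl] at h⟩⟩
    · obtain ⟨q, hq, hq1, hl⟩ := lookup_find p x hxK
      exact ⟨q, hq, Or.inr ⟨hkK, hq1.symm ▸ rfl, by rwa [hl] at h⟩⟩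

-- the pruning test extends validity
theorem compat_iff (p : List (String × Int × List String)) (hk : (p.map (·.1)).Nodup)
    (k : String) (chosen : List String) (hkK : k ∈ p.map (·.1))
    (hch : ∀ c ∈ chosen, c ∈ p.map (·.1)) (hval : pvValidB p chosen = true) :
    ((!(PySem.Set.contains ((pvConflict p).getD k PySem.Set.empty) k) &&
        chosen.all fun c => !(PySem.Set.contains ((pvConflict p).getD k PySem.Set.empty) c)) = true) ↔
      pvValidB p (chosen ++ [k]) = true := by
  have hcs : ∀ c, c ∈ p.map (·.1) →
      (c ∈ (pvConflict p).getD k PySem.Set.empty ↔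
        (c ∈ (pvLookup p k).2 ∨ k ∈ (pvLookup p c).2)) :=
    fun c hc => conflict_mem_nodup p hk k c hkK hc
  simp only [Bool.and_eq_true, Bool.not_eq_eq_eq_not, Bool.not_true, List.all_eq_true,
    ← Bool.not_eq_true, PySem.Set.contains_iff]
  rw [pvValidB_iff]
  rw [pvValidB_iff] at hval
  constructor
  · rintro ⟨h1, h2⟩ a ha b hb
    rw [hcs k hkK] at h1
    rcases List.mem_append.mp ha with ha' | ha'
    · rcases List.mem_append.mp hb with hb' | hb'
      · exact hval a ha' b hb'
      · rcases List.mem_singleton.mp hb' with rfl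
        have h2a := h2 a ha'
        rw [hcs a (hch a ha')] at h2a
        exact fun hmem => h2a (Or.inr hmem)
    · rcases List.mem_singleton.mp ha' with rfl
      rcases List.mem_append.mp hb with hb' | hb'
      · have h2b := h2 b hb'
        rw [hcs b (hch b hb')] at h2b
        exact fun hmem => h2b (Or.inl hmem)
      · rcases List.mem_singleton.mp hb' with rfl
        exact fun hmem => h1 (Or.inl hmem)
  · intro hv
    have hkmem : k ∈ chosen ++ [k] := List.mem_append.mpr (Or.inr (List.mem_singleton.mpr rfl))
    constructor
    · rw [hcs k hkK]
      rintro (h | h) <;> exact hv k hkmem k hkmem h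
    · intro c hc
      rw [hcs c (hch c hc)]
      have hcmem : c ∈ chosen ++ [k] := List.mem_append.mpr (Or.inl hc)
      rintro (h | h)
      · exact hv k hkmem c hcmem h
      · exact hv c hcmem k hkmem h

theorem pvSum_append1 (p : List (String × Int × List String)) (c : List String) (k : String) :
    pvSum p (c ++ [k]) = pvSum p c + (pvLookup p k).1 := by
  simp [pvSum, List.foldl_append]

theorem go_eq (p : List (String × Int × List String)) (hk : (p.map (·.1)).Nodup) :
    ∀ (rem chosen : List String) (total best : Int),
      (∀ x ∈ rem, x ∈ p.map (·.1)) → (∀ x ∈ chosen, x ∈ p.map (·.1)) →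
      chosen.length ≤ 4 → pvValidB p chosen = true → total = pvSum p chosen →
      pvGo p (pvConflict p) rem chosen total best =
        ((pyCombinations (4 - chosen.length) rem).filter
            (fun e => pvValidB p (chosen ++ e))).foldl
          (fun b e => max b (pvSum p (chosen ++ e))) best := by
  intro rem
  induction rem with
  | nil =>
    intro chosen total best _ hch hlen hval htot
    by_cases h4 : chosen.length = 4
    · rw [pvGo, if_pos (by simp [h4]), show 4 - chosen.length = 0 from by omega]
      simp [pyCombinations, List.filter, hval, htot]
    · rw [pvGo, if_neg (by simp [h4]),
        show 4 - chosen.length = (3 - chosen.length) + 1 from by omega]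
      simp [pyCombinations]
  | cons k rest ih =>
    intro chosen total best hrem hch hlen hval htot
    by_cases h4 : chosen.length = 4
    · rw [pvGo, if_pos (by simp [h4]), show 4 - chosen.length = 0 from by omega]
      simp [pyCombinations, List.filter, hval, htot]
    · have hkK : k ∈ p.map (·.1) := hrem k (List.mem_cons_self ..)
      have hrest : ∀ x ∈ rest, x ∈ p.map (·.1) :=
        fun x hx => hrem x (List.mem_cons_of_mem _ hx)
      rw [pvGo, if_neg (by simp [h4]),
        show 4 - chosen.length = (4 - (chosen.length + 1)) + 1 from by omega]
      simp only [pyCombinations, List.filter_append, List.foldl_append, List.filter_map,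
        List.foldl_map, Function.comp_def]
      by_cases hcompat : (!(PySem.Set.contains ((pvConflict p).getD k PySem.Set.empty) k) &&
          chosen.all fun c => !(PySem.Set.contains ((pvConflict p).getD k PySem.Set.empty) c)) = true
      · have hvalk : pvValidB p (chosen ++ [k]) = true :=
          (compat_iff p hk k chosen hkK hch hval).mp hcompat
        have hchk : ∀ x ∈ chosen ++ [k], x ∈ p.map (·.1) := by
          intro x hx
          rcases List.mem_append.mp hx with hx | hx
          · exact hch x hx
          · rcases List.mem_singleton.mp hx with rfl; exact hkK
        have hinner := ih (chosen ++ [k]) (total + (pvLookup p k).1) best hrest hchk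
          (by simp; omega) hvalk (by rw [pvSum_append1, htot])
        simp only [List.length_append, List.length_cons, List.length_nil, Nat.zero_add,
          ← List.append_cons] at hinner
        simp only [hcompat, if_true]
        rw [hinner, ih chosen total _ hrest hch hlen hval htot,
          show 4 - (chosen.length + 1) + 1 = 4 - chosen.length from by omega]
      · have hvalk : pvValidB p (chosen ++ [k]) = false := by
          rcases Bool.eq_false_or_eq_true (pvValidB p (chosen ++ [k])) with h | h
          · exact absurd ((compat_iff p hk k chosen hkK hch hval).mpr h) hcompat
          · exact h
        have hfilt : (pyCombinations (4 - (chosen.length + 1)) rest).filter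
            (fun e => pvValidB p (chosen ++ k :: e)) = [] := by
          rw [List.filter_eq_nil_iff]
          intro e _ habs
          rw [List.append_cons] at habs
          have := pvValidB_mono p (c₁ := chosen ++ [k]) (c₂ := (chosen ++ [k]) ++ e)
            (fun x hx => List.mem_append.mpr (Or.inl hx)) habs
          rw [hvalk] at this
          exact Bool.false_ne_true this
        rw [if_neg hcompat, hfilt]
        simp only [List.foldl_nil]
        rw [show 4 - (chosen.length + 1) + 1 = 4 - chosen.length from by omega]
        exact ih chosen total best hrest hch hlen hval htot

-- ===== VERDICT (by name: the statement is the Claim_ definition above) =====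
theorem calculate_max_concurrent_time_spec : Claim_equal_calculate_max_concurrent_time := by
  intro p _ hpre
  unfold Spec_calculate_max_concurrent_time
  rw [A_eq_fold, calculate_max_concurrent_time_alt,
    go_eq p hpre (p.map (·.1)) [] 0 0 (fun x h => h) (by simp) (by simp) (by simp [pvValidB]) (by simp [pvSum])]
  simp only [List.nil_append, List.length_nil, Nat.sub_zero]
  rw [← PySem.List.foldl_if_eq_foldl_filter]
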